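-- pv_equiv track=rewrite | github.com/MScomina/maximum-disjoint-edge-PSO | solvers/metaheuristics/LaPSO.py | _path_dict_creator
-- ===== SOURCE A (Python) =====
-- def _path_dict_creator(paths : list[list[int]]) -> dict[tuple[int, int], int]:
--     '''
--         Given a list of paths, creates a dictionary where the keys are the edges and the values are the number of times the edge is used in the paths.
--
--         Note: The resulting dictionary is symmetric (i.e. if (u, v) is in the dictionary, then (v, u) is also in the dictionary and has the same value).
--     '''
--     edge_dict = {}
--
--     for path in paths:
--         for i in range(len(path) - 1):
--             edge = (path[i], path[i+1])
--             if edge in edge_dict: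
--                 edge_dict[edge] += 1
--             else:
--                 edge_dict[edge] = 1
--             edge_reversed = (path[i+1], path[i])
--             if edge_reversed in edge_dict:
--                 edge_dict[edge_reversed] += 1
--             else:
--                 edge_dict[edge_reversed] = 1
--
--     return edge_dict
-- ===== SOURCE B (Python) =====
-- def _path_dict_creator(paths : list[list[int]]) -> dict[tuple[int, int], int]:
--     '''
--         Two-phase rebuild: first a flat counter of DIRECTED steps, then one pass over
--         the distinct directed keys emitting both symmetric entries with the summed count.
--     '''
--     steps = [(path[i], path[i + 1]) for path in paths for i in range(len(path) - 1)]
--     directed = {}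
--     for e in steps:
--         directed[e] = directed.get(e, 0) + 1
--     edge_dict = {}
--     for (u, v) in directed:
--         total = directed.get((u, v), 0) + directed.get((v, u), 0)
--         edge_dict[(u, v)] = total
--         edge_dict[(v, u)] = total
--     return edge_dict
-- ===== Notes on version B (the rewrite author's own statement) =====
-- stated objective: alternative
-- what changed: A interleaves two dict-membership-test-and-increment updates per step while walking every path; B first flattens all directed steps into one list, builds a directed-step counter in a single pass, and then a second, differently-shaped pass over the counter's distinct keys emits both symmetric entries at once with the summed directed counts.
import Mathlib
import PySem

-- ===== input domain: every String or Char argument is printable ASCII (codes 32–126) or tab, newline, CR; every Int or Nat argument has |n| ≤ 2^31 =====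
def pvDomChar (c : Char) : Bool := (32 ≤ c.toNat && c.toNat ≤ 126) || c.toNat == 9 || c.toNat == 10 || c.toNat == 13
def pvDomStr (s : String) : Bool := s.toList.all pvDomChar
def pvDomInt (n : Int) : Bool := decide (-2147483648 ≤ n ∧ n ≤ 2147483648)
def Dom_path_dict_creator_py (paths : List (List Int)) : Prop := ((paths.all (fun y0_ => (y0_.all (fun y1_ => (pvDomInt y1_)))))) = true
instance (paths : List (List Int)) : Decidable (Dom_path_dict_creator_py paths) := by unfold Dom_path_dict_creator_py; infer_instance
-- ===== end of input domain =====

-- B rebuilds the symmetric edge-usage dict in two phases (a flat directed-step counter, then one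
-- pass over its distinct keys emitting both symmetric entries) instead of A's interleaved
-- two-increments-per-step loop; objective: alternative decomposition, same exact output.

-- ===== PORT A =====
-- the body of A's inner loop: two "if edge in d: d[edge]+=1 else: d[edge]=1" updates
def pvAStep (path : List Int) (edge_dict : PySem.Dict (Int × Int) Int) (i : Int) :
    PySem.Dict (Int × Int) Int :=
  let edge : Int × Int := (PySem.List.pyGetD path i 0, PySem.List.pyGetD path (i + 1) 0)
  let edge_dict :=
    if edge_dict.contains edge then edge_dict.insert edge (edge_dict.getD edge 0 + 1)
    else edge_dict.insert edge 1
  let edge_reversed : Int × Int := (edge.2, edge.1)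
  if edge_dict.contains edge_reversed then
    edge_dict.insert edge_reversed (edge_dict.getD edge_reversed 0 + 1)
  else edge_dict.insert edge_reversed 1

def path_dict_creator_py (paths : List (List Int)) : List (Int × Int × Int) :=
  (paths.foldl (fun edge_dict path =>
      (PySem.List.pyRange 0 (PySem.List.len path - 1) 1).foldl (pvAStep path) edge_dict)
    PySem.Dict.empty).items.map (fun p => (p.1.1, p.1.2, p.2))

-- ===== PORT B =====
-- the comprehension [(path[i], path[i+1]) for path in paths for i in range(len(path)-1)]
def pvStepsOf (path : List Int) : List (Int × Int) :=
  (PySem.List.pyRange 0 (PySem.List.len path - 1) 1).map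
    (fun i => (PySem.List.pyGetD path i 0, PySem.List.pyGetD path (i + 1) 0))

-- the body of B's second loop: emit both symmetric entries with the summed directed counts
def pvBStep (directed edge_dict : PySem.Dict (Int × Int) Int) (e : Int × Int) :
    PySem.Dict (Int × Int) Int :=
  let total := directed.getD (e.1, e.2) 0 + directed.getD (e.2, e.1) 0
  (edge_dict.insert (e.1, e.2) total).insert (e.2, e.1) total

def path_dict_creator_py_alt (paths : List (List Int)) : List (Int × Int × Int) :=
  let steps : List (Int × Int) := paths.flatMap pvStepsOf
  let directed : PySem.Dict (Int × Int) Int :=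
    steps.foldl (fun d e => d.insert e (d.getD e 0 + 1)) PySem.Dict.empty
  let edge_dict : PySem.Dict (Int × Int) Int :=
    directed.keys.foldl (pvBStep directed) PySem.Dict.empty
  edge_dict.items.map (fun p => (p.1.1, p.1.2, p.2))

-- ===== PRECONDITION & SPEC =====
def Spec_path_dict_creator_py (paths : List (List Int)) (out : List (Int × Int × Int)) : Prop := out = path_dict_creator_py_alt paths
instance (paths : List (List Int)) (out : List (Int × Int × Int)) : Decidable (Spec_path_dict_creator_py paths out) := by unfold Spec_path_dict_creator_py; infer_instance

-- ===== CLAIM (what is proved, stated in full; the proofs are below) =====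
def Claim_equal_path_dict_creator_py : Prop := ∀ (paths : List (List Int)), Dom_path_dict_creator_py paths → Spec_path_dict_creator_py paths (path_dict_creator_py paths)

-- ===== LEMMAS AND PROOFS =====

-- A's "if edge in d: d[edge]+=1 else: d[edge]=1" is the counter step d.insert e (d.getD e 0 + 1)
lemma pv_branch_eq (d : PySem.Dict (Int × Int) Int) (e : Int × Int) :
    (if d.contains e then d.insert e (d.getD e 0 + 1) else d.insert e 1) =
      d.insert e (d.getD e 0 + 1) := by
  by_cases h : d.contains e = true
  · simp [h]
  · rw [if_neg (by simp [h]), PySem.Dict.getD_of_not_contains d 0 (by simpa using h)]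
    norm_num

lemma pvAStep_eq (path : List Int) (d : PySem.Dict (Int × Int) Int) (i : Int) :
    pvAStep path d i =
      [((PySem.List.pyGetD path i 0, PySem.List.pyGetD path (i + 1) 0) : Int × Int),
       (PySem.List.pyGetD path (i + 1) 0, PySem.List.pyGetD path i 0)].foldl
        (fun d e => d.insert e (d.getD e 0 + 1)) d := by
  simp only [pvAStep, pv_branch_eq, List.foldl_cons, List.foldl_nil]

-- update by an already-contained list is a no-op
lemma pv_update_of_subset (s : PySem.Set (Int × Int)) (xs : List (Int × Int))
    (h : ∀ x ∈ xs, x ∈ s) : PySem.Set.update s xs = s := by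
  rw [PySem.Set.update_eq_append_filter]
  have hnil : ((PySem.Set.ofList xs).filter (fun y => !(PySem.Set.contains s y))) = [] := by
    rw [List.filter_eq_nil_iff]
    intro y hy
    simpa using h y ((PySem.Set.mem_ofList xs y).mp hy)
  rw [hnil, List.append_nil]

-- dedup commutes with flatMap's duplicate blocks: deduplicating the generators first changes nothing
lemma pv_ofList_flatMap_dedup (F : (Int × Int) → List (Int × Int)) (l : List (Int × Int)) :
    PySem.Set.ofList (l.flatMap F) = PySem.Set.ofList ((PySem.Set.ofList l).flatMap F) := by
  induction l using List.reverseRecOn with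
  | nil => rfl
  | append_singleton l e ih =>
    rw [List.flatMap_append, PySem.Set.ofList_append, PySem.Set.ofList_append_singleton]
    by_cases hmem : e ∈ l
    · rw [PySem.Set.add_of_mem ((PySem.Set.mem_ofList l e).mpr hmem), ← ih]
      apply pv_update_of_subset
      intro x hx
      rw [PySem.Set.mem_ofList]
      exact List.mem_flatMap.mpr ⟨e, hmem, by simpa using hx⟩
    · rw [PySem.Set.add_of_not_mem (by simpa [PySem.Set.mem_ofList] using hmem),
        List.flatMap_append, PySem.Set.ofList_append, ih]

-- counting in the interleaved list = directed count + reversed count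
lemma pv_count_flatMap_swap (l : List (Int × Int)) (k : Int × Int) :
    (l.flatMap (fun e => [e, (e.2, e.1)])).count k = l.count k + l.count (k.2, k.1) := by
  induction l with
  | nil => simp
  | cons s rest ih =>
    have hswap : ((s.2, s.1) == k) = (s == (k.2, k.1)) := by
      cases s; cases k; simp [Prod.ext_iff, and_comm]
    simp only [List.flatMap_cons, List.count_append, List.count_cons, List.count_nil, ih, hswap]
    omega

-- a fold of inserts whose values depend only on the key builds (dedup'd keys, value) pairs
lemma pv_items_foldl_insert_g (g : (Int × Int) → Int) :
    ∀ (l : List (Int × Int)) (S : List (Int × Int)) (d : PySem.Dict (Int × Int) Int),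
      S.Nodup → d.items = S.map (fun k => (k, g k)) →
      (l.foldl (fun d k => d.insert k (g k)) d).items =
        (PySem.Set.update S l).map (fun k => (k, g k)) := by
  intro l
  induction l with
  | nil => intro S d _ hi; simpa [PySem.Set.update] using hi
  | cons k l ih =>
    intro S d hS hi
    have hkeys : d.keys = S := by
      simp [PySem.Dict.keys, hi, List.map_map, Function.comp_def]
    rw [List.foldl_cons, PySem.Set.update_cons]
    by_cases hc : d.contains k = true
    · have hkmem : k ∈ S := by
        have := (PySem.Dict.contains_iff_mem_keys d k).mp hc
        rwa [hkeys] at this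
      have hins : (d.insert k (g k)).items = S.map (fun k => (k, g k)) := by
        rw [PySem.Dict.items_insert_of_contains d (g k) hc, hi, List.map_map]
        apply List.map_congr_left
        intro x hx
        by_cases hxk : x = k
        · simp [hxk]
        · simp [hxk]
      rw [PySem.Set.add_of_mem hkmem]
      exact ih S _ hS hins
    · have hkmem : k ∉ S := by
        intro hmem
        exact hc ((PySem.Dict.contains_iff_mem_keys d k).mpr (hkeys ▸ hmem))
      have hadd : PySem.Set.add S k = S ++ [k] := PySem.Set.add_of_not_mem hkmem
      have hins : (d.insert k (g k)).items = (S ++ [k]).map (fun k => (k, g k)) := by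
        rw [PySem.Dict.items_insert_of_not_contains d (g k) (by simpa using hc), hi]
        simp
      rw [hadd]
      refine ih (S ++ [k]) _ ?_ hins
      rw [← hadd]
      exact PySem.Set.nodup_add S k hS
  -- the main equality
lemma pv_main (paths : List (List Int)) :
    path_dict_creator_py paths = path_dict_creator_py_alt paths := by
  -- A's dict is the counter of the interleaved step list
  have hA : (paths.foldl (fun edge_dict path =>
      (PySem.List.pyRange 0 (PySem.List.len path - 1) 1).foldl (pvAStep path) edge_dict)
      PySem.Dict.empty) =
      PySem.Dict.counter ((paths.flatMap pvStepsOf).flatMap (fun e => [e, (e.2, e.1)])) := by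
    have hbody : ∀ (path : List Int) (d : PySem.Dict (Int × Int) Int),
        (PySem.List.pyRange 0 (PySem.List.len path - 1) 1).foldl (pvAStep path) d =
        ((pvStepsOf path).flatMap (fun e => [e, (e.2, e.1)])).foldl
          (fun d e => d.insert e (d.getD e 0 + 1)) d := by
      intro path d
      rw [List.foldl_flatMap, pvStepsOf, List.foldl_map]
      exact PySem.List.foldl_congr_mem _ _ _ d (fun acc i _ => pvAStep_eq path acc i)
    calc (paths.foldl (fun edge_dict path =>
            (PySem.List.pyRange 0 (PySem.List.len path - 1) 1).foldl (pvAStep path) edge_dict)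
            PySem.Dict.empty)
        = paths.foldl (fun d path => ((pvStepsOf path).flatMap (fun e => [e, (e.2, e.1)])).foldl
            (fun d e => d.insert e (d.getD e 0 + 1)) d) PySem.Dict.empty :=
          PySem.List.foldl_congr_mem _ _ _ _ (fun d path _ => hbody path d)
      _ = (paths.flatMap (fun path => (pvStepsOf path).flatMap (fun e => [e, (e.2, e.1)]))).foldl
            (fun d e => d.insert e (d.getD e 0 + 1)) PySem.Dict.empty := List.foldl_flatMap.symm
      _ = ((paths.flatMap pvStepsOf).flatMap (fun e => [e, (e.2, e.1)])).foldl
            (fun d e => d.insert e (d.getD e 0 + 1)) PySem.Dict.empty := by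
            rw [List.flatMap_assoc]
      _ = _ := PySem.Dict.foldl_insert_getD_add_one_eq_counter _
  -- B's second pass is a fold of key-determined inserts over the interleaved dedup'd keys
  have hBstep : ∀ (steps : List (Int × Int)) (d : PySem.Dict (Int × Int) Int) (e : Int × Int),
      pvBStep (PySem.Dict.counter steps) d e =
      [e, (e.2, e.1)].foldl
        (fun d k => d.insert k ((steps.count k : Int) + (steps.count (k.2, k.1) : Int))) d := by
    intro steps d e
    simp only [pvBStep, PySem.Dict.getD_counter, List.foldl_cons, List.foldl_nil]
    have h2 : ((steps.count (e.2, e.1) : Int) + (steps.count ((e.2, e.1).2, (e.2, e.1).1) : Int))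
        = ((steps.count (e.1, e.2) : Int) + (steps.count (e.2, e.1) : Int)) := by
      simp; ring
    rw [h2]
  have hB : ∀ (steps : List (Int × Int)),
      ((PySem.Dict.counter steps).keys.foldl (pvBStep (PySem.Dict.counter steps))
        PySem.Dict.empty).items =
      (PySem.Set.ofList ((PySem.Set.ofList steps).flatMap (fun e => [e, (e.2, e.1)]))).map
        (fun k => (k, ((steps.count k : Int) + (steps.count (k.2, k.1) : Int)))) := by
    intro steps
    rw [PySem.Dict.keys_counter]
    have hfold : ((PySem.Set.ofList steps).foldl (pvBStep (PySem.Dict.counter steps))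
        PySem.Dict.empty) =
        (((PySem.Set.ofList steps).flatMap (fun e => [e, (e.2, e.1)]))).foldl
          (fun d k => d.insert k ((steps.count k : Int) + (steps.count (k.2, k.1) : Int)))
          PySem.Dict.empty := by
      rw [List.foldl_flatMap]
      exact PySem.List.foldl_congr_mem _ _ _ _ (fun d e _ => hBstep steps d e)
    rw [hfold]
    have := pv_items_foldl_insert_g
      (fun k => ((steps.count k : Int) + (steps.count (k.2, k.1) : Int)))
      ((PySem.Set.ofList steps).flatMap (fun e => [e, (e.2, e.1)])) []
      PySem.Dict.empty List.nodup_nil (by rfl)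
    rw [this, PySem.Set.update_nil_left]
  -- assemble
  show (paths.foldl _ PySem.Dict.empty).items.map _ = _
  rw [path_dict_creator_py_alt]
  simp only [hA, PySem.Dict.foldl_insert_getD_add_one_eq_counter]
  rw [hB (paths.flatMap pvStepsOf), PySem.Dict.items_counter,
    ← pv_ofList_flatMap_dedup (fun e => [e, (e.2, e.1)]) (paths.flatMap pvStepsOf)]
  congr 1
  apply List.map_congr_left
  intro k _
  rw [pv_count_flatMap_swap (paths.flatMap pvStepsOf) k]
  push_cast
  rfl

-- ===== VERDICT (by name: the statement is the Claim_ definition above) =====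
theorem path_dict_creator_py_spec : Claim_equal_path_dict_creator_py := by
  intro paths _
  unfold Spec_path_dict_creator_py
  exact pv_main paths
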